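-- pv_equiv track=rewrite | github.com/minvis95/TIL | algorithm/1493_수의새로운연산/sol1.py | new_sum
-- ===== SOURCE A (Python) =====
-- def new_sum(p, q):
--     ## p와 q의 좌표 찾기
--     # 큰수 찾기
--     big_num = 0
--     if p > q:
--         big_num = p
--     else:
--         big_num = q
--
--     default_val = 1
--     p_di, q_di = 0, 0
--     p_l = [1]*2
--     q_l = [1]*2
--     # 대각선 위치 찾기
--     for y in range(1, big_num+1):
--         default_val += y
--         if default_val > p and p_di == 0:
--             p_di = default_val - y
--             p_l[1] = y
--             re1 = y
--         if default_val > q and q_di == 0: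
--             q_di = default_val - y
--             q_l[1] = y
--             re2 = y
--     while p_di != p:
--         if p_di < p:
--             p_di += 1
--             p_l[0] += 1
--             p_l[1] -= 1
--     while q_di != q:
--         if q_di < q:
--             q_di += 1
--             q_l[0] += 1
--             q_l[1] -= 1
--     # p와 q의 좌표 합
--     sum_l = [p_l[0]+q_l[0], p_l[1] + q_l[1]]
--     # 좌표합의 숫자 찾기
--     default_val = 1
--     for i in range(1, re1+re2+1):
--         default_val += i
--     return default_val + sum_l[0]-1
-- ===== SOURCE B (Python) =====
-- def _isqrt(n):
--     # Newton's method integer square root (n >= 1)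
--     x = n
--     y = (x + 1) // 2
--     while y < x:
--         x = y
--         y = (x + n // x) // 2
--     return x
--
-- def _coord(n):
--     # diagonal index d (1-based) and offset r within the diagonal, 1 <= r <= d
--     d = (_isqrt(8 * n - 7) + 1) // 2
--     r = n - d * (d - 1) // 2
--     return d, r
--
-- def new_sum(p, q):
--     dp, rp = _coord(p)
--     dq, rq = _coord(q)
--     s = dp + dq
--     return s * (s + 1) // 2 + rp + rq
-- ===== Notes on version B (the rewrite author's own statement) =====
-- stated objective: faster
-- what changed: A scans every diagonal from 1 to max(p,q) and then walks along the diagonal one cell at a time; B computes each number's diagonal index and offset in closed form by inverting the triangular numbers with a Newton integer square root, so no scan over the grid remains.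
import Mathlib
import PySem

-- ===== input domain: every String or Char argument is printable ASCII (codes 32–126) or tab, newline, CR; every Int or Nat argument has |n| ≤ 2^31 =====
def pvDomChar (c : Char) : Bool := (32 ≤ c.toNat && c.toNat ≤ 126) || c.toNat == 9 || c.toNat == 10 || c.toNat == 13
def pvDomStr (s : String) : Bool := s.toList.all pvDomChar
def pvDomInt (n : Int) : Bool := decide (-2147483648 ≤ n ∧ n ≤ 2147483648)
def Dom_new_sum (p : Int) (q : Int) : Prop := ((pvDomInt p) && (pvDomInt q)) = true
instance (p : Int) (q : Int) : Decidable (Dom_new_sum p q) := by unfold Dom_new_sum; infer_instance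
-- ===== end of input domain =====

-- B replaces A's linear scan over the diagonals (and cell-by-cell walk along a diagonal)
-- by a closed-form triangular-number inversion using a Newton integer square root: faster (asymptotic).


-- ===== PORT A =====
-- loop state of A's single `for y in range(1, big_num+1)` pass:
-- default_val, p_di, q_di, p_l[1], q_l[1], re1, re2 (re1/re2 are 0 until Python first assigns them)
structure PvStA where
  dv : Int
  pdi : Int
  qdi : Int
  pl1 : Int
  ql1 : Int
  re1 : Int
  re2 : Int
deriving Repr, DecidableEq

def pvStepA (p q : Int) (s : PvStA) (y : Int) : PvStA :=
  let dv := s.dv + y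
  let s1 := if dv > p ∧ s.pdi = 0 then { s with dv := dv, pdi := dv - y, pl1 := y, re1 := y }
            else { s with dv := dv }
  if dv > q ∧ s1.qdi = 0 then { s1 with qdi := dv - y, ql1 := y, re2 := y } else s1

-- `while p_di != p: if p_di < p: p_di += 1; p_l[0] += 1; p_l[1] -= 1`
-- Python diverges when p_di > p (never under Pre_); the port returns the state there.
def pvWhileA (target : Int) (di : Int) (l0 : Int) (l1 : Int) : Int × Int :=
  if di < target then pvWhileA target (di + 1) (l0 + 1) (l1 - 1) else (l0, l1)
termination_by (target - di).toNat
decreasing_by omega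

def new_sum (p : Int) (q : Int) : Int :=
  let big_num := if p > q then p else q
  let st := (PySem.List.pyRange 1 (big_num + 1)).foldl (pvStepA p q) ⟨1, 0, 0, 1, 1, 0, 0⟩
  let pl := pvWhileA p st.pdi 1 st.pl1
  let ql := pvWhileA q st.qdi 1 st.ql1
  let sum0 := pl.1 + ql.1
  let dv2 := (PySem.List.pyRange 1 (st.re1 + st.re2 + 1)).foldl (fun a i => a + i) 1
  dv2 + sum0 - 1

-- ===== PORT B =====
-- Newton loop `while y < x: x = y; y = (x + n//x)//2`; the extra `0 < y` in the guard only
-- makes the recursion total — for n ≥ 1 every reachable y is positive, so it never changes a run.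
def pvIsqrtAux (n : Int) (x : Int) (y : Int) : Int :=
  if 0 < y ∧ y < x then
    pvIsqrtAux n y (PySem.Int.floordiv (y + PySem.Int.floordiv n y) 2)
  else x
termination_by x.toNat
decreasing_by omega

def pvIsqrt (n : Int) : Int := pvIsqrtAux n n (PySem.Int.floordiv (n + 1) 2)

def pvCoord (n : Int) : Int × Int :=
  let d := PySem.Int.floordiv (pvIsqrt (8 * n - 7) + 1) 2
  let r := n - PySem.Int.floordiv (d * (d - 1)) 2
  (d, r)

def new_sum_alt (p : Int) (q : Int) : Int :=
  let cp := pvCoord p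
  let cq := pvCoord q
  let s := cp.1 + cq.1
  PySem.Int.floordiv (s * (s + 1)) 2 + cp.2 + cq.2

-- ===== PRECONDITION & SPEC =====
-- Pre_ excludes p ≤ 0 or q ≤ 0: there Python A diverges in its `while` loop (one coordinate
-- stuck above the target) or raises NameError (re1/re2 never assigned); A returns on all of Pre_.
def Pre_new_sum (p : Int) (q : Int) : Prop := 1 ≤ p ∧ 1 ≤ q
instance (p : Int) (q : Int) : Decidable (Pre_new_sum p q) := by unfold Pre_new_sum; infer_instance

def pvWitness_new_sum : Int × Int := (3, 5)

def Spec_new_sum (p : Int) (q : Int) (out : Int) : Prop := out = new_sum_alt p q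
instance (p : Int) (q : Int) (out : Int) : Decidable (Spec_new_sum p q out) := by unfold Spec_new_sum; infer_instance

-- ===== CLAIM (what is proved, stated in full; the proofs are below) =====
def Claim_equal_new_sum : Prop := ∀ (p : Int) (q : Int), Dom_new_sum p q → Pre_new_sum p q → Spec_new_sum p q (new_sum p q)

-- ===== LEMMAS AND PROOFS =====

-- tri k = k-th triangular number, written exactly as B writes it
def tri (k : Int) : Int := PySem.Int.floordiv (k * (k + 1)) 2

lemma tri_two (k : Int) : 2 * tri k = k * (k + 1) := by
  obtain ⟨j, hj⟩ := Int.even_mul_succ_self k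
  have : tri k = j := by
    unfold tri
    rw [PySem.Int.floordiv_eq_iff_of_pos (by omega)]
    omega
  omega

lemma tri_succ (k : Int) : tri k = tri (k - 1) + k := by
  have h1 := tri_two k
  have h2 := tri_two (k - 1)
  nlinarith

lemma tri_mono {a b : Int} (ha : 0 ≤ a) (hab : a ≤ b) : tri a ≤ tri b := by
  have h1 := tri_two a
  have h2 := tri_two b
  nlinarith

lemma le_tri {k : Int} (hk : 0 ≤ k) : k ≤ tri k := by
  have h := tri_two k
  nlinarith [sq_nonneg k, mul_self_nonneg k]

lemma tri_nonneg {k : Int} (hk : 0 ≤ k) : 0 ≤ tri k := by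
  have h := tri_two k
  nlinarith

-- the `while` loop walks the coordinate k steps
lemma pvWhileA_spec (k : Nat) : ∀ (target di l0 l1 : Int), di + k = target →
    pvWhileA target di l0 l1 = (l0 + k, l1 - k) := by
  induction k with
  | zero =>
    intro target di l0 l1 h
    unfold pvWhileA
    simp
    omega
  | succ m ih =>
    intro target di l0 l1 h
    unfold pvWhileA
    rw [if_pos (by omega)]
    rw [ih target (di + 1) (l0 + 1) (l1 - 1) (by omega)]
    simp only [Prod.mk.injEq]
    push_cast
    constructor <;> ring

-- the closing `for i in range(1, N+1)` loop sums to 1 + tri N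
lemma sum_loop_spec (n : Nat) :
    (PySem.List.pyRange 1 ((n : Int) + 1)).foldl (fun a i => a + i) 1 = 1 + tri n := by
  induction n with
  | zero =>
    have : tri 0 = 0 := by decide
    simp [PySem.List.pyRange, this]
  | succ m ih =>
    have hr : PySem.List.pyRange 1 ((m : Int) + 1 + 1) =
        PySem.List.pyRange 1 ((m : Int) + 1) ++ [(m : Int) + 1] := by
      exact PySem.List.pyRange_one_succ_right (by omega)
    push_cast
    rw [hr, List.foldl_append, ih]

    simp
    rw [tri_succ ((m : Int) + 1), show ((m : Int) + 1 - 1) = (m : Int) from by ring]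
    ring

-- the main for-loop: the state after folding over range(1, N+1)
def foldSt (p q : Int) (N : Int) : PvStA :=
  (PySem.List.pyRange 1 (N + 1)).foldl (pvStepA p q) ⟨1, 0, 0, 1, 1, 0, 0⟩

lemma tri_succ' (k : Int) : tri (k + 1) = tri k + (k + 1) := by
  have h := tri_succ (k + 1)
  rw [show k + 1 - 1 = k from by ring] at h
  exact h

-- one step of A's for-loop preserves the latch characterisation
lemma pvStepA_char (p q dp dq : Int) (hp1 : 1 ≤ dp) (hq1 : 1 ≤ dq)
    (hpl : tri (dp - 1) < p) (hpu : p ≤ tri dp)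
    (hql : tri (dq - 1) < q) (hqu : q ≤ tri dq)
    (m : Int) (hm : 0 ≤ m) (st : PvStA)
    (hdv : st.dv = 1 + tri m)
    (hP : if m < dp then st.pdi = 0 ∧ st.pl1 = 1 ∧ st.re1 = 0
          else st.pdi = tri (dp - 1) + 1 ∧ st.pl1 = dp ∧ st.re1 = dp)
    (hQ : if m < dq then st.qdi = 0 ∧ st.ql1 = 1 ∧ st.re2 = 0
          else st.qdi = tri (dq - 1) + 1 ∧ st.ql1 = dq ∧ st.re2 = dq) :
    (pvStepA p q st (m + 1)).dv = 1 + tri (m + 1) ∧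
    (if m + 1 < dp then (pvStepA p q st (m + 1)).pdi = 0 ∧ (pvStepA p q st (m + 1)).pl1 = 1 ∧ (pvStepA p q st (m + 1)).re1 = 0
       else (pvStepA p q st (m + 1)).pdi = tri (dp - 1) + 1 ∧ (pvStepA p q st (m + 1)).pl1 = dp ∧ (pvStepA p q st (m + 1)).re1 = dp) ∧
    (if m + 1 < dq then (pvStepA p q st (m + 1)).qdi = 0 ∧ (pvStepA p q st (m + 1)).ql1 = 1 ∧ (pvStepA p q st (m + 1)).re2 = 0
       else (pvStepA p q st (m + 1)).qdi = tri (dq - 1) + 1 ∧ (pvStepA p q st (m + 1)).ql1 = dq ∧ (pvStepA p q st (m + 1)).re2 = dq) := by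
  have htm := tri_succ' m
  have htrip : 0 ≤ tri (dp - 1) := tri_nonneg (by omega)
  have htriq : 0 ≤ tri (dq - 1) := tri_nonneg (by omega)
  -- the p-latch fires exactly at step m + 1 = dp, the q-latch at m + 1 = dq
  have hcp : (st.dv + (m + 1) > p ∧ st.pdi = 0) ↔ m + 1 = dp := by
    constructor
    · rintro ⟨h1, h2⟩
      by_contra hne
      rcases lt_trichotomy (m + 1) dp with h | h | h
      · have hmono : tri (m + 1) ≤ tri (dp - 1) := tri_mono (by omega) (by omega)
        omega
      · exact hne h
      · rw [if_neg (by omega)] at hP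
        omega
    · intro h
      rw [if_pos (by omega)] at hP
      have : tri dp = tri m + (m + 1) := by rw [← h]; exact tri_succ' m
      refine ⟨by omega, hP.1⟩
  have hcq : (st.dv + (m + 1) > q ∧ st.qdi = 0) ↔ m + 1 = dq := by
    constructor
    · rintro ⟨h1, h2⟩
      by_contra hne
      rcases lt_trichotomy (m + 1) dq with h | h | h
      · have hmono : tri (m + 1) ≤ tri (dq - 1) := tri_mono (by omega) (by omega)
        omega
      · exact hne h
      · rw [if_neg (by omega)] at hQ
        omega
    · intro h
      rw [if_pos (by omega)] at hQ
      have : tri dq = tri m + (m + 1) := by rw [← h]; exact tri_succ' m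
      refine ⟨by omega, hQ.1⟩
  have hPno1 : m + 1 < dp → ¬(st.dv + (m + 1) > p) := by
    intro h
    have hmono : tri (m + 1) ≤ tri (dp - 1) := tri_mono (by omega) (by omega)
    omega
  have hPno2 : dp < m + 1 → st.pdi ≠ 0 := by
    intro h
    rw [if_neg (by omega)] at hP
    omega
  have hQno1 : m + 1 < dq → ¬(st.dv + (m + 1) > q) := by
    intro h
    have hmono : tri (m + 1) ≤ tri (dq - 1) := tri_mono (by omega) (by omega)
    omega
  have hQno2 : dq < m + 1 → st.qdi ≠ 0 := by
    intro h
    rw [if_neg (by omega)] at hQ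
    omega
  have hstep : pvStepA p q st (m + 1) =
      { dv := st.dv + (m + 1),
        pdi := if m + 1 = dp then st.dv else st.pdi,
        qdi := if m + 1 = dq then st.dv else st.qdi,
        pl1 := if m + 1 = dp then m + 1 else st.pl1,
        ql1 := if m + 1 = dq then m + 1 else st.ql1,
        re1 := if m + 1 = dp then m + 1 else st.re1,
        re2 := if m + 1 = dq then m + 1 else st.re2 } := by
    by_cases hfp : m + 1 = dp <;> by_cases hfq : m + 1 = dq
    · obtain ⟨ha, hb⟩ := hcp.mpr hfp
      obtain ⟨hc, hd⟩ := hcq.mpr hfq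
      subst hfp
      subst hfq
      simp [pvStepA, ha, hb, hc, hd]
    · obtain ⟨ha, hb⟩ := hcp.mpr hfp
      have hno : ¬(st.dv + (m + 1) > q ∧ st.qdi = 0) := by
        rcases lt_or_gt_of_ne hfq with h | h
        · exact fun hcon => hQno1 h hcon.1
        · exact fun hcon => hQno2 h hcon.2
      subst hfp
      simp [pvStepA, ha, hb, hno, hfq]
    · obtain ⟨hc, hd⟩ := hcq.mpr hfq
      have hno : ¬(st.dv + (m + 1) > p ∧ st.pdi = 0) := by
        rcases lt_or_gt_of_ne hfp with h | h
        · exact fun hcon => hPno1 h hcon.1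
        · exact fun hcon => hPno2 h hcon.2
      subst hfq
      simp [pvStepA, hc, hd, hno, hfp]
    · have hnop : ¬(st.dv + (m + 1) > p ∧ st.pdi = 0) := by
        rcases lt_or_gt_of_ne hfp with h | h
        · exact fun hcon => hPno1 h hcon.1
        · exact fun hcon => hPno2 h hcon.2
      have hnoq : ¬(st.dv + (m + 1) > q ∧ st.qdi = 0) := by
        rcases lt_or_gt_of_ne hfq with h | h
        · exact fun hcon => hQno1 h hcon.1
        · exact fun hcon => hQno2 h hcon.2
      simp [pvStepA, hnop, hnoq, hfp, hfq]
  rw [hstep]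
  refine ⟨by simp; omega, ?_, ?_⟩
  · by_cases hfp : m + 1 = dp
    · have hdp' : tri (dp - 1) = tri m := by
        rw [← hfp, show m + 1 - 1 = m from by ring]
      rw [if_neg (by omega)]
      simp [if_pos hfp]
      omega
    · rcases lt_or_gt_of_ne hfp with h | h
      · rw [if_pos h]
        rw [if_pos (by omega)] at hP
        simp [if_neg hfp]
        exact ⟨hP.1, hP.2.1, hP.2.2⟩
      · rw [if_neg (by omega)]
        rw [if_neg (by omega)] at hP
        simp [if_neg hfp]
        exact ⟨hP.1, hP.2.1, hP.2.2⟩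
  · by_cases hfq : m + 1 = dq
    · have hdq' : tri (dq - 1) = tri m := by
        rw [← hfq, show m + 1 - 1 = m from by ring]
      rw [if_neg (by omega)]
      simp [if_pos hfq]
      omega
    · rcases lt_or_gt_of_ne hfq with h | h
      · rw [if_pos h]
        rw [if_pos (by omega)] at hQ
        simp [if_neg hfq]
        exact ⟨hQ.1, hQ.2.1, hQ.2.2⟩
      · rw [if_neg (by omega)]
        rw [if_neg (by omega)] at hQ
        simp [if_neg hfq]
        exact ⟨hQ.1, hQ.2.1, hQ.2.2⟩

lemma foldA_spec (p q dp dq : Int) (hp1 : 1 ≤ dp) (hq1 : 1 ≤ dq)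
    (hpl : tri (dp - 1) < p) (hpu : p ≤ tri dp)
    (hql : tri (dq - 1) < q) (hqu : q ≤ tri dq) (n : Nat) :
    (foldSt p q (n : Int)).dv = 1 + tri (n : Int) ∧
    (if (n : Int) < dp then (foldSt p q (n : Int)).pdi = 0 ∧ (foldSt p q (n : Int)).pl1 = 1 ∧ (foldSt p q (n : Int)).re1 = 0
       else (foldSt p q (n : Int)).pdi = tri (dp - 1) + 1 ∧ (foldSt p q (n : Int)).pl1 = dp ∧ (foldSt p q (n : Int)).re1 = dp) ∧
    (if (n : Int) < dq then (foldSt p q (n : Int)).qdi = 0 ∧ (foldSt p q (n : Int)).ql1 = 1 ∧ (foldSt p q (n : Int)).re2 = 0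
       else (foldSt p q (n : Int)).qdi = tri (dq - 1) + 1 ∧ (foldSt p q (n : Int)).ql1 = dq ∧ (foldSt p q (n : Int)).re2 = dq) := by
  induction n with
  | zero =>
    have h0 : foldSt p q ((0 : Nat) : Int) = ⟨1, 0, 0, 1, 1, 0, 0⟩ := by
      norm_num [foldSt, show PySem.List.pyRange (1 : Int) (0 + 1) = [] from by decide]
    rw [h0]
    refine ⟨by decide, ?_, ?_⟩ <;> rw [if_pos (by push_cast; omega)] <;> exact ⟨rfl, rfl, rfl⟩
  | succ m ih =>
    have hr : foldSt p q ((m + 1 : Nat) : Int) = pvStepA p q (foldSt p q (m : Int)) ((m : Int) + 1) := by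
      unfold foldSt
      rw [show (((m + 1 : Nat) : Int) + 1) = ((m : Int) + 1) + 1 from by push_cast; ring,
        PySem.List.pyRange_one_succ_right (by omega), List.foldl_append]
      rfl
    obtain ⟨hdv, hP, hQ⟩ := ih
    have := pvStepA_char p q dp dq hp1 hq1 hpl hpu hql hqu (m : Int) (by omega)
      (foldSt p q (m : Int)) hdv hP hQ
    rw [hr]
    push_cast
    exact this

-- pvIsqrtAux computes the integer square root (Newton invariant: x never drops below s)
lemma pvIsqrtAux_spec (n s : Int) (hs : 1 ≤ s) (hl : s * s ≤ n) (hu : n < (s + 1) * (s + 1)) :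
    ∀ (x : Int), s ≤ x →
      pvIsqrtAux n x (PySem.Int.floordiv (x + PySem.Int.floordiv n x) 2) = s := by
  suffices H : ∀ (k : Nat) (x : Int), x.toNat = k → s ≤ x →
      pvIsqrtAux n x (PySem.Int.floordiv (x + PySem.Int.floordiv n x) 2) = s by
    intro x hx; exact H x.toNat x rfl hx
  intro k
  induction k using Nat.strong_induction_on with
  | _ k ih =>
    intro x hk hsx
    have hx0 : 0 < x := by omega
    have hq := PySem.Int.le_floordiv_iff_mul_le (a := n) (q := PySem.Int.floordiv n x) hx0
    have hql : PySem.Int.floordiv n x * x ≤ n := hq.mp le_rfl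
    have hqu : n < (PySem.Int.floordiv n x + 1) * x :=
      (PySem.Int.floordiv_lt_iff_lt_mul hx0).mp (lt_add_one _)
    set q := PySem.Int.floordiv n x with hqdef
    set y := PySem.Int.floordiv (x + q) 2 with hydef
    have hys : s ≤ y := by
      rw [hydef, PySem.Int.le_floordiv_iff_mul_le (by norm_num)]
      by_contra hcon
      have h1 : q ≤ 2 * s - 1 - x := by omega
      have h2 : q * x ≤ (2 * s - 1 - x) * x := mul_le_mul_of_nonneg_right h1 (le_of_lt hx0)
      nlinarith [sq_nonneg (s - x)]
    rw [pvIsqrtAux]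
    by_cases hyx : y < x
    · rw [if_pos ⟨by omega, hyx⟩]
      exact ih y.toNat (by omega) y rfl hys
    · rw [if_neg (by omega)]
      by_contra hne
      have hx1 : s + 1 ≤ x := by omega
      have hnx : n < x * x := by nlinarith
      have hqx : q < x := by
        rw [hqdef]
        exact (PySem.Int.floordiv_lt_iff_lt_mul hx0).mpr hnx
      have : y < x := by
        rw [hydef]
        exact (PySem.Int.floordiv_lt_iff_lt_mul (by norm_num)).mpr (by omega)
      omega

lemma pvIsqrt_spec (n s : Int) (hs : 1 ≤ s) (hl : s * s ≤ n) (hu : n < (s + 1) * (s + 1)) :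
    pvIsqrt n = s := by
  have hn : 1 ≤ n := le_trans (by nlinarith) hl
  have hdd : PySem.Int.floordiv n n = 1 := by
    rw [PySem.Int.floordiv_eq_iff_of_pos (by omega)]
    constructor <;> nlinarith
  have h := pvIsqrtAux_spec n s hs hl hu n (by nlinarith)
  rw [hdd] at h
  unfold pvIsqrt
  exact h

-- B's diagonal index d satisfies tri (d-1) < n ≤ tri d, and B's offset is n - tri (d-1)
lemma pvCoord_spec (n : Int) (hn : 1 ≤ n) :
    1 ≤ (pvCoord n).1 ∧ tri ((pvCoord n).1 - 1) < n ∧ n ≤ tri (pvCoord n).1 ∧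
    (pvCoord n).2 = n - tri ((pvCoord n).1 - 1) := by
  set N : Int := 8 * n - 7 with hNdef
  have hN1 : 1 ≤ N := by omega
  set s : Int := (N.toNat.sqrt : Int) with hsdef
  have hsl : s * s ≤ N := by
    have h := Nat.sqrt_le' N.toNat
    rw [pow_two] at h
    zify at h
    rwa [Int.toNat_of_nonneg (show (0 : Int) ≤ N by omega)] at h
  have hsu : N < (s + 1) * (s + 1) := by
    have h := Nat.lt_succ_sqrt' N.toNat
    rw [Nat.succ_eq_add_one, pow_two] at h
    zify at h
    rwa [Int.toNat_of_nonneg (show (0 : Int) ≤ N by omega)] at h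
  have hs1 : 1 ≤ s := by
    have h : 0 < N.toNat.sqrt := Nat.sqrt_pos.mpr (by omega)
    omega
  have hiq : pvIsqrt N = s := pvIsqrt_spec N s hs1 hsl hsu
  have hcoord : pvCoord n =
      (PySem.Int.floordiv (s + 1) 2,
       n - PySem.Int.floordiv (PySem.Int.floordiv (s + 1) 2 * (PySem.Int.floordiv (s + 1) 2 - 1)) 2) := by
    simp only [pvCoord, ← hNdef, hiq]
  set d : Int := PySem.Int.floordiv (s + 1) 2 with hddef
  have hdb : d * 2 + PySem.Int.mod (s + 1) 2 = s + 1 := PySem.Int.floordiv_mul_add_mod (s + 1) 2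
  have hm0 : 0 ≤ PySem.Int.mod (s + 1) 2 := PySem.Int.mod_nonneg _ (by norm_num)
  have hm2 : PySem.Int.mod (s + 1) 2 < 2 := PySem.Int.mod_lt _ (by norm_num)
  have hd1 : 1 ≤ d := by omega
  have hodd : (2 * d + 1) * (2 * d + 1) = 8 * tri d + 1 := by
    have := tri_two d
    nlinarith
  have hodd' : (2 * d - 1) * (2 * d - 1) = 8 * tri (d - 1) + 1 := by
    have := tri_two (d - 1)
    nlinarith
  have hupper : n ≤ tri d := by
    have h1 : s + 1 ≤ 2 * d + 1 := by omega
    have h2 : (s + 1) * (s + 1) ≤ (2 * d + 1) * (2 * d + 1) := by nlinarith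
    omega
  have hlower : tri (d - 1) < n := by
    have h1 : 2 * d - 1 ≤ s := by omega
    have h2 : (2 * d - 1) * (2 * d - 1) ≤ s * s := by nlinarith
    omega
  have hr : PySem.Int.floordiv (d * (d - 1)) 2 = tri (d - 1) := by
    unfold tri
    rw [show d * (d - 1) = (d - 1) * (d - 1 + 1) from by ring]
  rw [hcoord]
  exact ⟨hd1, hlower, hupper, by rw [hr]⟩

-- ===== VERDICT (by name: the statement is the Claim_ definition above) =====
theorem new_sum_spec : Claim_equal_new_sum := by
  intro p q hdom hpre
  obtain ⟨hp, hq⟩ := hpre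
  obtain ⟨hdp1, hdpl, hdpu, hrp⟩ := pvCoord_spec p hp
  obtain ⟨hdq1, hdql, hdqu, hrq⟩ := pvCoord_spec q hq
  set dp : Int := (pvCoord p).1 with hdp
  set rp : Int := (pvCoord p).2 with hrpd
  set dq : Int := (pvCoord q).1 with hdq
  set rq : Int := (pvCoord q).2 with hrqd
  have hB : new_sum_alt p q = tri (dp + dq) + rp + rq := rfl
  set big : Int := if p > q then p else q with hbig
  have hbigge : p ≤ big ∧ q ≤ big := by rw [hbig]; split <;> omega
  have hdple : dp ≤ p := by have := le_tri (k := dp - 1) (by omega); omega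
  have hdqle : dq ≤ q := by have := le_tri (k := dq - 1) (by omega); omega
  have hbig0 : 0 ≤ big := by omega
  have hcast : (big.toNat : Int) = big := Int.toNat_of_nonneg hbig0
  have hst := foldA_spec p q dp dq (by omega) (by omega) hdpl hdpu hdql hdqu big.toNat
  rw [hcast] at hst
  obtain ⟨hdv, hP, hQ⟩ := hst
  rw [if_neg (by omega)] at hP
  rw [if_neg (by omega)] at hQ
  obtain ⟨hpdi, hpl1, hre1⟩ := hP
  obtain ⟨hqdi, hql1, hre2⟩ := hQ
  have hrp1 : 1 ≤ rp := by omega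
  have hrq1 : 1 ≤ rq := by omega
  have hwp : pvWhileA p (foldSt p q big).pdi 1 (foldSt p q big).pl1 =
      (1 + ((rp - 1).toNat : Int), (foldSt p q big).pl1 - ((rp - 1).toNat : Int)) :=
    pvWhileA_spec (rp - 1).toNat p _ 1 _ (by omega)
  have hwq : pvWhileA q (foldSt p q big).qdi 1 (foldSt p q big).ql1 =
      (1 + ((rq - 1).toNat : Int), (foldSt p q big).ql1 - ((rq - 1).toNat : Int)) :=
    pvWhileA_spec (rq - 1).toNat q _ 1 _ (by omega)
  have hS0 : 0 ≤ dp + dq := by omega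
  have hScast : ((dp + dq).toNat : Int) = dp + dq := Int.toNat_of_nonneg hS0
  have hsum := sum_loop_spec (dp + dq).toNat
  rw [hScast] at hsum
  have hA : new_sum p q =
      ((PySem.List.pyRange 1 ((foldSt p q big).re1 + (foldSt p q big).re2 + 1)).foldl
          (fun a i => a + i) 1) +
        ((pvWhileA p (foldSt p q big).pdi 1 (foldSt p q big).pl1).1 +
          (pvWhileA q (foldSt p q big).qdi 1 (foldSt p q big).ql1).1) - 1 := by
    rw [hbig]
    rfl
  show new_sum p q = new_sum_alt p q
  rw [hB, hA, hwp, hwq, hre1, hre2, hsum]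
  omega
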